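-- pv_equiv track=rewrite | github.com/anthonytk31415/leetcode | python-fundamentals/nqueens2.py | intersect
-- ===== SOURCE A (Python) =====
-- def intersect(board, row, col, n):
--     ## check row
--     for j in range(n):
--         if j != col and board[row][j] == 'Q':
--             return True
--
--     ## check col
--     for i in range(n):
--         if i != row and board[i][col] == 'Q':
--             return True
--
--     ## check downslope diagonal
--     for d in range(-n+1, n):
--         if d != 0 and 0 <= (row + d) < n and 0 <= (col + d) < n and board[row+d][col+d] == 'Q':
--             return True
--
--     ## check upslope diagonal
--     for d in range(-n+1, n):
--         if d != 0 and 0 <= (row - d) < n and 0 <= (col + d) < n and board[row-d][col+d] == 'Q':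
--             return True
--     return False
--
-- board = [[None, None, None], ['Q', None, None], [None, 'Q', None]]
-- ===== SOURCE B (Python) =====
-- def intersect(board, row, col, n):
--     for i in range(n):
--         for j in range(n):
--             if board[i][j] == 'Q' and (i, j) != (row, col) and (
--                 i == row or j == col or i - j == row - col or i + j == row + col
--             ):
--                 return True
--     return False
-- ===== Notes on version B (the rewrite author's own statement) =====
-- stated objective: simpler
-- what changed: Replaces the four separate line scans (row, column, two diagonals with range(-n+1,n) offsets) by one nested pass over all n*n cells testing the single attack predicate i==row or j==col or i-j==row-col or i+j==row+col.
-- outside the precondition, e.g. on intersect([[None, None], [None, 'Q']], -1, 0, 2): A returns True, B returns False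
import Mathlib
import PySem

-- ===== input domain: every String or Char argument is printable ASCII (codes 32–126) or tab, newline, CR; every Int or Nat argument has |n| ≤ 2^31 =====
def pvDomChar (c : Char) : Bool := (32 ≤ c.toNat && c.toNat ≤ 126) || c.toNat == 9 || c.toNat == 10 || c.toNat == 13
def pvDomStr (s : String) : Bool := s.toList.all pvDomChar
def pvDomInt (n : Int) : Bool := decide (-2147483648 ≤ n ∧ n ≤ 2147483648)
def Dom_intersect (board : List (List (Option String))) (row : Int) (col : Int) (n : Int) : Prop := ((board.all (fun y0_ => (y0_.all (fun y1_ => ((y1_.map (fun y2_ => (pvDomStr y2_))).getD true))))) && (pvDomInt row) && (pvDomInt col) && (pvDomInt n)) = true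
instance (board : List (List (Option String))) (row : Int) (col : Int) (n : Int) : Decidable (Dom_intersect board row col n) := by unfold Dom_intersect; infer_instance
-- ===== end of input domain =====

-- B replaces A's four separate line scans by one nested full-board pass with a single
-- attack predicate; simpler (shorter, one condition), not faster.


-- ===== PORT A =====
-- board[r][c] == 'Q'; the `none` (IndexError) branch is unreachable under Pre_intersect.
def cellQ_A (board : List (List (Option String))) (r c : Int) : Bool :=
  match PySem.List.pyGet? board r with
  | some rw => PySem.List.pyGet? rw c == some (some "Q")
  | none => false

def intersect (board : List (List (Option String))) (row : Int) (col : Int) (n : Int) : Bool :=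
  -- check row
  if (PySem.List.pyRange 0 n 1).any (fun j => decide (j ≠ col) && cellQ_A board row j) then true
  -- check col
  else if (PySem.List.pyRange 0 n 1).any (fun i => decide (i ≠ row) && cellQ_A board i col) then true
  -- check downslope diagonal
  else if (PySem.List.pyRange (-n+1) n 1).any (fun d =>
      decide (d ≠ 0) && decide (0 ≤ row + d) && decide (row + d < n) &&
      decide (0 ≤ col + d) && decide (col + d < n) && cellQ_A board (row + d) (col + d)) then true
  -- check upslope diagonal
  else if (PySem.List.pyRange (-n+1) n 1).any (fun d =>
      decide (d ≠ 0) && decide (0 ≤ row - d) && decide (row - d < n) &&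
      decide (0 ≤ col + d) && decide (col + d < n) && cellQ_A board (row - d) (col + d)) then true
  else false

-- ===== PORT B =====
def cellQ_B (board : List (List (Option String))) (i j : Int) : Bool :=
  ((PySem.List.pyGet? board i).bind (fun r => PySem.List.pyGet? r j)) == some (some "Q")

def intersect_alt (board : List (List (Option String))) (row : Int) (col : Int) (n : Int) : Bool :=
  (PySem.List.pyRange 0 n 1).any fun i =>
    (PySem.List.pyRange 0 n 1).any fun j =>
      cellQ_B board i j && !(decide (i = row) && decide (j = col)) &&
      (decide (i = row) || decide (j = col) ||
       decide (i - j = row - col) || decide (i + j = row + col))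

-- ===== PRECONDITION & SPEC =====
-- Pre_ excludes inputs where the Python A raises IndexError (row/col outside [0,n) with n > 0,
-- or a board that is not n×n), and thereby also the inputs where A only returns a value through
-- Python's negative-index wraparound — an accident of A's indexing that B does not reproduce.
def Pre_intersect (board : List (List (Option String))) (row : Int) (col : Int) (n : Int) : Prop :=
  n ≤ 0 ∨ (0 ≤ row ∧ row < n ∧ 0 ≤ col ∧ col < n ∧ (board.length : Int) = n ∧
           ∀ r ∈ board, (r.length : Int) = n)
instance (board : List (List (Option String))) (row : Int) (col : Int) (n : Int) : Decidable (Pre_intersect board row col n) := by unfold Pre_intersect; infer_instance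
def pvWitness_intersect : List (List (Option String)) × Int × Int × Int :=
  ([[none, none, none], [some "Q", none, none], [none, some "Q", none]], 1, 1, 3)
def Spec_intersect (board : List (List (Option String))) (row : Int) (col : Int) (n : Int) (out : Bool) : Prop := out = intersect_alt board row col n
instance (board : List (List (Option String))) (row : Int) (col : Int) (n : Int) (out : Bool) : Decidable (Spec_intersect board row col n out) := by unfold Spec_intersect; infer_instance

-- ===== CLAIM (what is proved, stated in full; the proofs are below) =====
def Claim_equal_intersect : Prop := ∀ (board : List (List (Option String))) (row : Int) (col : Int) (n : Int), Dom_intersect board row col n → Pre_intersect board row col n → Spec_intersect board row col n (intersect board row col n)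

-- ===== LEMMAS AND PROOFS =====
theorem cellQ_eq (board : List (List (Option String))) (i j : Int) :
    cellQ_A board i j = cellQ_B board i j := by
  unfold cellQ_A cellQ_B
  cases PySem.List.pyGet? board i <;> simp [Option.bind]

theorem intersect_main (board : List (List (Option String))) (row col n : Int)
    (h : Pre_intersect board row col n) :
    intersect board row col n = intersect_alt board row col n := by
  rcases h with hn | ⟨hr0, hrn, hc0, hcn, _, _⟩
  · -- n ≤ 0 : all ranges are empty, both sides are false
    unfold intersect intersect_alt
    rw [PySem.List.pyRange_one_eq_nil hn, PySem.List.pyRange_one_eq_nil (by omega : n ≤ -n + 1)]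
    simp
  · -- 0 ≤ row < n, 0 ≤ col < n
    unfold intersect intersect_alt
    simp only [cellQ_eq, Bool.if_true_left, Bool.or_false]
    rw [Bool.eq_iff_iff]
    simp only [Bool.or_eq_true, List.any_eq_true, PySem.List.mem_pyRange_one, Bool.and_eq_true,
      Bool.not_eq_true', Bool.and_eq_false_iff, decide_eq_true_iff, decide_eq_false_iff_not, and_assoc, or_assoc]
    constructor
    · rintro (⟨j, hj0, hjn, hne, hq⟩ | ⟨i, hi0, hin, hne, hq⟩ |
        ⟨d, _, _, hd, h1, h2, h3, h4, hq⟩ | ⟨d, _, _, hd, h1, h2, h3, h4, hq⟩)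
      · exact ⟨row, hr0, hrn, j, hj0, hjn, hq, Or.inr hne, Or.inl rfl⟩
      · exact ⟨i, hi0, hin, col, hc0, hcn, hq, Or.inl hne, Or.inr (Or.inl rfl)⟩
      · exact ⟨row + d, h1, h2, col + d, h3, h4, hq, Or.inl (by omega),
          Or.inr (Or.inr (Or.inl (by omega)))⟩
      · exact ⟨row - d, h1, h2, col + d, h3, h4, hq, Or.inr (by omega),
          Or.inr (Or.inr (Or.inr (by omega)))⟩
    · rintro ⟨i, hi0, hin, j, hj0, hjn, hq, hne, hline⟩
      rcases hline with hir | hjc | hdn | hup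
      · refine Or.inl ⟨j, hj0, hjn, ?_, ?_⟩
        · rcases hne with h | h <;> omega
        · rw [← hir]; exact hq
      · refine Or.inr (Or.inl ⟨i, hi0, hin, ?_, ?_⟩)
        · rcases hne with h | h <;> omega
        · rw [← hjc]; exact hq
      · have hd0 : i - row ≠ 0 := by rcases hne with h | h <;> omega
        refine Or.inr (Or.inr (Or.inl ⟨i - row, by omega, by omega, hd0,
          by omega, by omega, by omega, by omega, ?_⟩))
        have h1 : row + (i - row) = i := by omega
        have h2 : col + (i - row) = j := by omega
        rw [h1, h2]; exact hq
      · have hd0 : row - i ≠ 0 := by rcases hne with h | h <;> omega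
        refine Or.inr (Or.inr (Or.inr ⟨row - i, by omega, by omega, hd0,
          by omega, by omega, by omega, by omega, ?_⟩))
        have h1 : row - (row - i) = i := by omega
        have h2 : col + (row - i) = j := by omega
        rw [h1, h2]; exact hq

-- ===== VERDICT (by name: the statement is the Claim_ definition above) =====
theorem intersect_spec : Claim_equal_intersect := by
  intro board row col n _ hpre
  unfold Spec_intersect
  exact intersect_main board row col n hpre
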